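-- pv_equiv track=rewrite | github.com/bhanuharshithbalusu/vit-bfhl-api | app.py | alternating_caps_reverse_concatenation
-- ===== SOURCE A (Python) =====
-- from typing import List, Any
--
-- def alternating_caps_reverse_concatenation(alphabet_items_upper: List[str]) -> str:
--     """
--     Build 'concat_string' as specified:
--     - Take all alphabetical characters present in the input
--     - Convert to uppercase (per character)
--     - Concatenate in input order
--     - Reverse the entire string
--     - Apply alternating caps starting with UPPER at index 0
--     """
--     # 1) Uppercase per-letter and concatenate in input order
--     letters = []
--     for token in alphabet_items_upper:
--         for ch in token:
--             if ch.isalpha():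
--                 letters.append(ch.upper())
--     # 2) Reverse
--     letters.reverse()
--     # 3) Alternating caps starting with upper
--     out_chars = []
--     for i, ch in enumerate(letters):
--         out_chars.append(ch.upper() if i % 2 == 0 else ch.lower())
--     return "".join(out_chars)
-- ===== SOURCE B (Python) =====
-- from typing import List
--
-- def alternating_caps_reverse_concatenation(alphabet_items_upper: List[str]) -> str:
--     # Single reversed pass: walk tokens and characters back-to-front, keep only
--     # letters, and case each kept letter directly from a running parity counter.
--     out = []
--     i = 0
--     for token in reversed(alphabet_items_upper):
--         for ch in reversed(token):
--             if ch.isalpha():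
--                 out.append(ch.upper() if i % 2 == 0 else ch.lower())
--                 i += 1
--     return "".join(out)
-- ===== Notes on version B (the rewrite author's own statement) =====
-- stated objective: simpler
-- what changed: Replaces A's three passes (collect-and-uppercase, reverse, enumerate-and-recase) with a single back-to-front traversal keeping a parity counter, dropping the dead per-letter uppercasing.
import Mathlib
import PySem

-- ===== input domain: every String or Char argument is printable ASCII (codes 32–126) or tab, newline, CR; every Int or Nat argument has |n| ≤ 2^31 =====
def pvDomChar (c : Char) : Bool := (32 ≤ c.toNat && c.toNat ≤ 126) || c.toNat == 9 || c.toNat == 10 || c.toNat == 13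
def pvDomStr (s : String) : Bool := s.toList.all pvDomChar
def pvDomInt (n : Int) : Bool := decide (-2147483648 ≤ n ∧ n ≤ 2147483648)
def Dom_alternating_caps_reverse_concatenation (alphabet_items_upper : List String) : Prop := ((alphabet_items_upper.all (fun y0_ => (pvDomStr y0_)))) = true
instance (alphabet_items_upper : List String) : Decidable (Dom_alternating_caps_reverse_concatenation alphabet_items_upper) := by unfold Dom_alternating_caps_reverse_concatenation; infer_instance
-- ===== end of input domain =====

-- B replaces A's three passes (collect-uppercase, reverse, enumerate-recase) with one
-- back-to-front traversal keeping a parity counter; same result, different decomposition.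


-- ===== PORT A =====
def alternating_caps_reverse_concatenation (alphabet_items_upper : List String) : String :=
  -- 1) uppercase per-letter and concatenate in input order
  let letters : List Char := alphabet_items_upper.foldl (fun acc token =>
    token.toList.foldl (fun acc ch =>
      if PySem.Chars.isalpha ch then acc ++ [PySem.Chars.upperChar ch] else acc) acc) []
  -- 2) reverse
  let letters := letters.reverse
  -- 3) alternating caps starting with upper
  let out_chars : List Char := (PySem.List.enumerate letters 0).foldl (fun acc p =>
    acc ++ [if PySem.Int.mod p.1 2 == 0 then PySem.Chars.upperChar p.2
            else PySem.Chars.lowerChar p.2]) []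
  String.mk out_chars

-- ===== PORT B =====
def alternating_caps_reverse_concatenation_alt (alphabet_items_upper : List String) : String :=
  -- single reversed pass with a running parity counter
  let st : List Char × Int := alphabet_items_upper.reverse.foldl (fun st token =>
    token.toList.reverse.foldl (fun st ch =>
      if PySem.Chars.isalpha ch then
        (st.1 ++ [if PySem.Int.mod st.2 2 == 0 then PySem.Chars.upperChar ch
                  else PySem.Chars.lowerChar ch], st.2 + 1)
      else st) st) ([], 0)
  String.mk st.1

-- ===== PRECONDITION & SPEC =====
def Spec_alternating_caps_reverse_concatenation (alphabet_items_upper : List String) (out : String) : Prop := out = alternating_caps_reverse_concatenation_alt alphabet_items_upper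
instance (alphabet_items_upper : List String) (out : String) : Decidable (Spec_alternating_caps_reverse_concatenation alphabet_items_upper out) := by unfold Spec_alternating_caps_reverse_concatenation; infer_instance

-- ===== CLAIM (what is proved, stated in full; the proofs are below) =====
def Claim_equal_alternating_caps_reverse_concatenation : Prop := ∀ (alphabet_items_upper : List String), Dom_alternating_caps_reverse_concatenation alphabet_items_upper → Spec_alternating_caps_reverse_concatenation alphabet_items_upper (alternating_caps_reverse_concatenation alphabet_items_upper)

-- ===== LEMMAS AND PROOFS =====

-- alternating caps of a char list, counter starting at i
def pvAltFrom : List Char → Int → List Char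
  | [], _ => []
  | c :: cs, i =>
      (if PySem.Int.mod i 2 == 0 then PySem.Chars.upperChar c else PySem.Chars.lowerChar c)
        :: pvAltFrom cs (i + 1)

theorem pvAltFrom_append (l₁ l₂ : List Char) (i : Int) :
    pvAltFrom (l₁ ++ l₂) i = pvAltFrom l₁ i ++ pvAltFrom l₂ (i + l₁.length) := by
  induction l₁ generalizing i with
  | nil => simp [pvAltFrom]
  | cons c cs ih =>
      simp only [List.cons_append, pvAltFrom, ih, List.length_cons, List.cons_append]
      congr 2
      push_cast
      ring

-- character-range characterisations
theorem pvIslower_iff (c : Char) :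
    PySem.Chars.islower c = true ↔ 97 ≤ c.toNat ∧ c.toNat ≤ 122 := by
  have h1 : ('a'.val).toNat = 97 := rfl
  have h2 : ('z'.val).toNat = 122 := rfl
  have h3 : c.toNat = c.val.toNat := rfl
  simp only [PySem.Chars.islower, Bool.and_eq_true, decide_eq_true_eq, Char.le_def,
    UInt32.le_iff_toNat_le]
  omega

theorem pvIsupper_iff (c : Char) :
    PySem.Chars.isupper c = true ↔ 65 ≤ c.toNat ∧ c.toNat ≤ 90 := by
  have h1 : ('A'.val).toNat = 65 := rfl
  have h2 : ('Z'.val).toNat = 90 := rfl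
  have h3 : c.toNat = c.val.toNat := rfl
  simp only [PySem.Chars.isupper, Bool.and_eq_true, decide_eq_true_eq, Char.le_def,
    UInt32.le_iff_toNat_le]
  omega

theorem pvToNat_ofNat (n : Nat) (h : n < 55296) : (Char.ofNat n).toNat = n := by
  have hv : Nat.isValidChar n := Or.inl h
  have h4 : Char.ofNat n = Char.ofNatAux n hv := by simp [Char.ofNat, hv]
  rw [h4]
  have h5 : (Char.ofNatAux n hv).toNat = (UInt32.ofNatLT n _).toNat := rfl
  rw [h5, UInt32.toNat_ofNatLT]

theorem pvChar_eq_of_toNat {a b : Char} (h : a.toNat = b.toNat) : a = b := by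
  apply Char.ext
  exact UInt32.toNat_inj.mp h

theorem pvToNat_upper_of_lower {c : Char} (h : PySem.Chars.islower c = true) :
    (PySem.Chars.upperChar c).toNat = c.toNat - 32 := by
  have hb := (pvIslower_iff c).mp h
  rw [PySem.Chars.upperChar, if_pos h]
  exact pvToNat_ofNat _ (by omega)

theorem pvUpper_upper {c : Char} (h : PySem.Chars.isalpha c = true) :
    PySem.Chars.upperChar (PySem.Chars.upperChar c) = PySem.Chars.upperChar c := by
  by_cases hl : PySem.Chars.islower c = true
  · have hb := (pvIslower_iff c).mp hl
    have ht := pvToNat_upper_of_lower hl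
    have hnl : PySem.Chars.islower (PySem.Chars.upperChar c) = false := by
      rw [Bool.eq_false_iff]
      intro hcon
      have := (pvIslower_iff _).mp hcon
      omega
    rw [PySem.Chars.upperChar, if_neg (by simp [hnl])]
  · have h' : PySem.Chars.upperChar c = c := by rw [PySem.Chars.upperChar, if_neg hl]
    rw [h']
    exact h'

theorem pvLower_upper {c : Char} (h : PySem.Chars.isalpha c = true) :
    PySem.Chars.lowerChar (PySem.Chars.upperChar c) = PySem.Chars.lowerChar c := by
  by_cases hl : PySem.Chars.islower c = true
  · have hb := (pvIslower_iff c).mp hl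
    have ht := pvToNat_upper_of_lower hl
    have hu : PySem.Chars.isupper (PySem.Chars.upperChar c) = true :=
      (pvIsupper_iff _).mpr (by omega)
    have hnu : PySem.Chars.isupper c = false := by
      rw [Bool.eq_false_iff]
      intro hcon
      have := (pvIsupper_iff c).mp hcon
      omega
    rw [show PySem.Chars.lowerChar c = c from by rw [PySem.Chars.lowerChar, if_neg (by simp [hnu])]]
    rw [PySem.Chars.lowerChar, if_pos hu]
    apply pvChar_eq_of_toNat
    rw [pvToNat_ofNat _ (by omega)]
    omega
  · rw [show PySem.Chars.upperChar c = c from by rw [PySem.Chars.upperChar, if_neg hl]]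

theorem pvAltFrom_map_upper (L : List Char) (i : Int)
    (h : ∀ c ∈ L, PySem.Chars.isalpha c = true) :
    pvAltFrom (L.map PySem.Chars.upperChar) i = pvAltFrom L i := by
  induction L generalizing i with
  | nil => rfl
  | cons c cs ih =>
      have hc := h c (List.mem_cons_self)
      simp only [List.map_cons, pvAltFrom, ih _ (fun x hx => h x (List.mem_cons_of_mem _ hx))]
      congr 1
      split
      · exact pvUpper_upper hc
      · exact pvLower_upper hc

-- A-side characterisation
theorem pvA_inner (cs : List Char) (acc : List Char) :
    cs.foldl (fun acc ch =>
        if PySem.Chars.isalpha ch then acc ++ [PySem.Chars.upperChar ch] else acc) acc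
      = acc ++ (cs.filter PySem.Chars.isalpha).map PySem.Chars.upperChar := by
  induction cs generalizing acc with
  | nil => simp
  | cons c cs ih =>
      by_cases h : PySem.Chars.isalpha c = true <;>
        simp [List.foldl_cons, h, ih, List.filter_cons]

theorem pvA_outer (ts : List String) (acc : List Char) :
    ts.foldl (fun acc token =>
        token.toList.foldl (fun acc ch =>
          if PySem.Chars.isalpha ch then acc ++ [PySem.Chars.upperChar ch] else acc) acc) acc
      = acc ++ ((ts.flatMap (fun t => t.toList)).filter PySem.Chars.isalpha).map
          PySem.Chars.upperChar := by
  induction ts generalizing acc with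
  | nil => simp
  | cons t ts ih =>
      rw [List.foldl_cons, pvA_inner, ih]
      simp [List.flatMap_cons, List.filter_append, List.append_assoc]

theorem pvA_enum (L : List Char) (acc : List Char) (s : Int) :
    (PySem.List.enumerate L s).foldl (fun acc p =>
        acc ++ [if PySem.Int.mod p.1 2 == 0 then PySem.Chars.upperChar p.2
                else PySem.Chars.lowerChar p.2]) acc
      = acc ++ pvAltFrom L s := by
  induction L generalizing acc s with
  | nil => simp [PySem.List.enumerate, pvAltFrom]
  | cons c cs ih =>
      simp only [PySem.List.enumerate, List.foldl_cons, ih, pvAltFrom, List.append_assoc,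
        List.singleton_append]

-- B-side characterisation
theorem pvB_inner (cs : List Char) (st : List Char × Int) :
    cs.foldl (fun st ch =>
        if PySem.Chars.isalpha ch then
          (st.1 ++ [if PySem.Int.mod st.2 2 == 0 then PySem.Chars.upperChar ch
                    else PySem.Chars.lowerChar ch], st.2 + 1)
        else st) st
      = (st.1 ++ pvAltFrom (cs.filter PySem.Chars.isalpha) st.2,
         st.2 + (cs.filter PySem.Chars.isalpha).length) := by
  induction cs generalizing st with
  | nil => simp [pvAltFrom]
  | cons c cs ih =>
      cases h : PySem.Chars.isalpha c
      · simp only [List.foldl_cons, h, Bool.false_eq_true, if_false, ih, List.filter_cons]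
      · simp only [List.foldl_cons, h, if_true, ih, List.filter_cons, pvAltFrom,
          List.length_cons, Prod.mk.injEq, List.append_assoc, List.singleton_append]
        constructor
        · trivial
        · push_cast; ring

theorem pvB_outer (ts : List String) (st : List Char × Int) :
    ts.foldl (fun st token =>
        token.toList.reverse.foldl (fun st ch =>
          if PySem.Chars.isalpha ch then
            (st.1 ++ [if PySem.Int.mod st.2 2 == 0 then PySem.Chars.upperChar ch
                      else PySem.Chars.lowerChar ch], st.2 + 1)
          else st) st) st
      = (st.1 ++ pvAltFrom ((ts.flatMap (fun t => t.toList.reverse)).filter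
            PySem.Chars.isalpha) st.2,
         st.2 + ((ts.flatMap (fun t => t.toList.reverse)).filter PySem.Chars.isalpha).length) := by
  induction ts generalizing st with
  | nil => simp [pvAltFrom]
  | cons t ts ih =>
      rw [List.foldl_cons, pvB_inner, ih]
      simp only [List.flatMap_cons, List.filter_append, pvAltFrom_append, List.append_assoc,
        List.length_append, Prod.mk.injEq]
      constructor
      · trivial
      · push_cast; ring

-- ===== VERDICT (by name: the statement is the Claim_ definition above) =====
theorem alternating_caps_reverse_concatenation_spec : Claim_equal_alternating_caps_reverse_concatenation := by
  intro xs _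
  show alternating_caps_reverse_concatenation xs = alternating_caps_reverse_concatenation_alt xs
  rw [alternating_caps_reverse_concatenation, alternating_caps_reverse_concatenation_alt]
  simp only [pvA_outer, pvA_enum, pvB_outer, List.nil_append]
  congr 1
  have hflat : xs.reverse.flatMap (fun t => t.toList.reverse)
      = (xs.flatMap (fun t => t.toList)).reverse := by
    rw [List.reverse_flatMap]
    rfl
  have hmap : ∀ (l : List Char),
      (l.map PySem.Chars.upperChar).reverse = l.reverse.map PySem.Chars.upperChar := by
    simp
  rw [hflat, List.filter_reverse, hmap]
  exact pvAltFrom_map_upper _ _ (fun c hc =>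
    (List.mem_filter.mp (List.mem_reverse.mp hc)).2)
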